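-- pv_equiv track=rewrite | github.com/dominic999/dot-detection | incercare/bubbles_bbox_matrix.py | mask_to_spans
-- ===== SOURCE A (Python) =====
-- def mask_to_spans(mask_1d):
--     spans = []
--     start = None
--     for i, value in enumerate(mask_1d):
--         if value and start is None:
--             start = i
--         elif not value and start is not None:
--             spans.append((start, i - 1))
--             start = None
--
--     if start is not None:
--         spans.append((start, len(mask_1d) - 1))
--     return spans
-- ===== SOURCE B (Python) =====
-- def mask_to_spans(mask_1d):
--     n = len(mask_1d)
--     starts = [i for i in range(n) if mask_1d[i] and (i == 0 or not mask_1d[i - 1])]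
--     ends = [i for i in range(n) if mask_1d[i] and (i == n - 1 or not mask_1d[i + 1])]
--     return list(zip(starts, ends))
-- ===== Notes on version B (the rewrite author's own statement) =====
-- stated objective: alternative
-- what changed: Replaced A's single-pass state machine (pending-start flag with close-on-falsy and end-of-list finalization) by two neighbour-comparison index scans that collect run-start indices and run-end indices separately and zip them into spans.
import Mathlib
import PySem

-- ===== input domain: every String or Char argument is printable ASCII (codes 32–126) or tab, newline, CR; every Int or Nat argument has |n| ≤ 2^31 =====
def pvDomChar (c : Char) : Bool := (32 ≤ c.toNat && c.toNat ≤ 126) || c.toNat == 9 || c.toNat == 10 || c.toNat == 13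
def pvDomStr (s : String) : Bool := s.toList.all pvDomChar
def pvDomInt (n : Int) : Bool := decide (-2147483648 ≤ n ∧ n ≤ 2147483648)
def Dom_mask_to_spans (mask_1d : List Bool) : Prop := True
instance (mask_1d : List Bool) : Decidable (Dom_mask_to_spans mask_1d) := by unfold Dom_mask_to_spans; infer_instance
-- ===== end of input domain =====

-- B replaces A's start-flag state machine with two index scans (run starts, run ends) zipped together; objective: alternative decomposition, same cost.

-- ===== PORT A =====
-- A: one pass with an optional pending start; spans appended when a run closes (or at the end).
def mask_to_spans (mask_1d : List Bool) : List (Int × Int) :=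
  let st := (PySem.List.enumerate mask_1d 0).foldl
    (fun (p : List (Int × Int) × Option Int) iv =>
      match iv.2, p.2 with
      | true, none => (p.1, some iv.1)
      | false, some s => (p.1 ++ [(s, iv.1 - 1)], none)
      | _, _ => p)
    ([], none)
  match st.2 with
  | some s => st.1 ++ [(s, (mask_1d.length : Int) - 1)]
  | none => st.1

-- ===== PORT B =====
-- B: starts = truthy cells whose left neighbour is absent/falsy; ends = truthy cells whose
-- right neighbour is absent/falsy; result = zip starts ends.  (Python's short-circuited
-- neighbour lookups are ported with pyGetD; the guard makes the out-of-range branch irrelevant.)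
def mask_to_spans_alt (mask_1d : List Bool) : List (Int × Int) :=
  List.zip
    ((PySem.List.pyRange 0 (mask_1d.length : Int) 1).filter
      (fun i => PySem.List.pyGetD mask_1d i false &&
        (i == 0 || !(PySem.List.pyGetD mask_1d (i - 1) false))))
    ((PySem.List.pyRange 0 (mask_1d.length : Int) 1).filter
      (fun i => PySem.List.pyGetD mask_1d i false &&
        (i == (mask_1d.length : Int) - 1 || !(PySem.List.pyGetD mask_1d (i + 1) false))))

-- ===== PRECONDITION & SPEC =====
def Spec_mask_to_spans (mask_1d : List Bool) (out : List (Int × Int)) : Prop := out = mask_to_spans_alt mask_1d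
instance (mask_1d : List Bool) (out : List (Int × Int)) : Decidable (Spec_mask_to_spans mask_1d out) := by unfold Spec_mask_to_spans; infer_instance

-- ===== CLAIM (what is proved, stated in full; the proofs are below) =====
def Claim_equal_mask_to_spans : Prop := ∀ (mask_1d : List Bool), Dom_mask_to_spans mask_1d → Spec_mask_to_spans mask_1d (mask_to_spans mask_1d)

-- ===== LEMMAS AND PROOFS =====

-- A's loop as a structural recursion (k = current index, start = pending run start).
def runsA (k : Int) (start : Option Int) : List Bool → List (Int × Int)
  | [] => match start with | some s => [(s, k - 1)] | none => []
  | b :: t =>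
    match b, start with
    | true, none => runsA (k + 1) (some k) t
    | false, some s => (s, k - 1) :: runsA (k + 1) none t
    | _, _ => runsA (k + 1) start t

-- run starts, tracking the previous cell's value
def startsB (prev : Bool) (k : Int) : List Bool → List Int
  | [] => []
  | b :: t => if b && !prev then k :: startsB b (k + 1) t else startsB b (k + 1) t

-- run ends, tracking the previous cell's value (end emitted one step late)
def endsB (prev : Bool) (k : Int) : List Bool → List Int
  | [] => if prev then [k - 1] else []
  | b :: t => if prev && !b then (k - 1) :: endsB b (k + 1) t else endsB b (k + 1) t

-- run ends, forward-looking
def endsB2 (k : Int) : List Bool → List Int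
  | [] => []
  | b :: t => if b && !(t.headD false) then k :: endsB2 (k + 1) t else endsB2 (k + 1) t

lemma endsB_eq_endsB2 (l : List Bool) : ∀ (prev : Bool) (k : Int),
    endsB prev k l = (if prev && !(l.headD false) then [k - 1] else []) ++ endsB2 k l := by
  induction l with
  | nil => intro prev k; cases prev <;> simp [endsB, endsB2]
  | cons b t ih =>
    intro prev k
    simp only [endsB, endsB2, ih b (k + 1), List.headD_cons]
    cases prev <;> cases b <;> try simp
    all_goals cases h : t.head?.getD false <;> simp [h]

-- key lemma: the state machine equals the zip of starts and ends
lemma runsA_eq_zip (l : List Bool) : ∀ (k : Int) (start : Option Int),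
    runsA k start l =
      List.zip ((match start with | some s => [s] | none => []) ++ startsB start.isSome k l)
               (endsB start.isSome k l) := by
  induction l with
  | nil =>
    intro k start
    cases start <;> simp [runsA, startsB, endsB]
  | cons b t ih =>
    intro k start
    cases start with
    | none =>
      cases b <;> simp [runsA, startsB, endsB, ih]
    | some s =>
      cases b <;> simp [runsA, startsB, endsB, ih]

-- the finalizing step of A (pending run closed at the right edge)
def finA (n : Int) (p : List (Int × Int) × Option Int) : List (Int × Int) :=
  match p.2 with
  | some s => p.1 ++ [(s, n - 1)]
  | none => p.1

-- bridge: A's foldl over enumerate, finalized, equals runsA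
lemma bridgeA (l : List Bool) : ∀ (k : Int) (acc : List (Int × Int)) (start : Option Int),
    finA (k + l.length)
      ((PySem.List.enumerate l k).foldl
        (fun (p : List (Int × Int) × Option Int) iv =>
          match iv.2, p.2 with
          | true, none => (p.1, some iv.1)
          | false, some s => (p.1 ++ [(s, iv.1 - 1)], none)
          | _, _ => p)
        (acc, start)) = acc ++ runsA k start l := by
  induction l with
  | nil =>
    intro k acc start
    cases start <;> simp [PySem.List.enumerate_nil, finA, runsA]
  | cons b t ih =>
    intro k acc start
    rw [PySem.List.enumerate_cons]
    have hl : (k : Int) + ((b :: t).length : Int) = (k + 1) + (t.length : Int) := by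
      simp only [List.length_cons, Nat.cast_add, Nat.cast_one]; ring
    rw [hl]
    cases start with
    | none =>
      cases b
      · simpa [runsA] using ih (k + 1) acc none
      · simpa [runsA] using ih (k + 1) acc (some k)
    | some s =>
      cases b
      · simpa [runsA] using ih (k + 1) (acc ++ [(s, k - 1)]) none
      · simpa [runsA] using ih (k + 1) acc (some s)

lemma mask_to_spans_eq_runsA (mask : List Bool) : mask_to_spans mask = runsA 0 none mask := by
  have h := bridgeA mask 0 [] none
  rw [zero_add, List.nil_append] at h
  rw [← h]
  rfl

-- the previous cell's value seen from absolute position k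
def prevOf (mask : List Bool) (k : Nat) : Bool :=
  if k = 0 then false else mask.getD (k - 1) false

lemma startsFilter (mask : List Bool) : ∀ (k : Nat), k ≤ mask.length →
    (PySem.List.pyRange (k : Int) (mask.length : Int) 1).filter
        (fun i => PySem.List.pyGetD mask i false &&
          (i == 0 || !(PySem.List.pyGetD mask (i - 1) false)))
      = startsB (prevOf mask k) k (mask.drop k) := by
  intro k hk
  induction h : mask.length - k generalizing k with
  | zero =>
    have hke : k = mask.length := by omega
    subst hke
    rw [PySem.List.pyRange_one_eq_nil (by omega)]
    simp [startsB, List.drop_of_length_le]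
  | succ m ih =>
    have hlt : k < mask.length := by omega
    rw [PySem.List.pyRange_one_cons (by exact_mod_cast hlt)]
    rw [List.drop_eq_getElem_cons hlt]
    simp only [List.filter_cons]
    have hcur : PySem.List.pyGetD mask (k : Int) false = mask[k] := by
      rw [PySem.List.pyGetD_natCast]
      simp [List.getD_eq_getElem?_getD, List.getElem?_eq_getElem hlt]
    have hcond : (PySem.List.pyGetD mask (k : Int) false &&
        ((k : Int) == 0 || !(PySem.List.pyGetD mask ((k : Int) - 1) false)))
        = (mask[k] && !(prevOf mask k)) := by
      rw [hcur]
      by_cases hk0 : k = 0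
      · subst hk0; simp [prevOf]
      · have hprev : PySem.List.pyGetD mask ((k : Int) - 1) false = mask.getD (k - 1) false := by
          have hc : ((k : Int) - 1) = ((k - 1 : Nat) : Int) := by omega
          rw [hc, PySem.List.pyGetD_natCast]
        have hne : ((k : Int) == 0) = false := by
          simp only [beq_eq_false_iff_ne, ne_eq, Nat.cast_eq_zero]
          exact hk0
        rw [hprev, hne]
        simp [prevOf, hk0]
    rw [hcond]
    have hnext : prevOf mask (k + 1) = mask[k] := by
      simp [prevOf, List.getD_eq_getElem?_getD, List.getElem?_eq_getElem hlt]
    have ihk := ih (k + 1) (by omega) (by omega)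
    rw [hnext] at ihk
    have hcast : ((k : Int) + 1) = ((k + 1 : Nat) : Int) := by push_cast; ring
    simp only [startsB]
    rw [hcast, ihk]

lemma endsFilter (mask : List Bool) : ∀ (k : Nat), k ≤ mask.length →
    (PySem.List.pyRange (k : Int) (mask.length : Int) 1).filter
        (fun i => PySem.List.pyGetD mask i false &&
          (i == (mask.length : Int) - 1 || !(PySem.List.pyGetD mask (i + 1) false)))
      = endsB2 k (mask.drop k) := by
  intro k hk
  induction h : mask.length - k generalizing k with
  | zero =>
    have hke : k = mask.length := by omega
    subst hke
    rw [PySem.List.pyRange_one_eq_nil (by omega)]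
    simp [endsB2, List.drop_of_length_le]
  | succ m ih =>
    have hlt : k < mask.length := by omega
    rw [PySem.List.pyRange_one_cons (by exact_mod_cast hlt)]
    rw [List.drop_eq_getElem_cons hlt]
    simp only [List.filter_cons]
    have hcur : PySem.List.pyGetD mask (k : Int) false = mask[k] := by
      rw [PySem.List.pyGetD_natCast]
      simp [List.getD_eq_getElem?_getD, List.getElem?_eq_getElem hlt]
    have hhead : (mask.drop (k + 1)).headD false = mask.getD (k + 1) false := by
      rw [List.getD_eq_getElem?_getD, List.headD_eq_head?_getD, List.head?_drop]
    have hcond : (PySem.List.pyGetD mask (k : Int) false &&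
        ((k : Int) == (mask.length : Int) - 1 || !(PySem.List.pyGetD mask ((k : Int) + 1) false)))
        = (mask[k] && !((mask.drop (k + 1)).headD false)) := by
      rw [hcur, hhead]
      by_cases hlast : k = mask.length - 1
      · have h1 : ((k : Int) == (mask.length : Int) - 1) = true := by
          simp only [beq_iff_eq]; omega
        have h2 : mask.getD (k + 1) false = false := by
          rw [List.getD_eq_getElem?_getD, List.getElem?_eq_none (by omega)]
          rfl
        rw [h1, h2]
        simp
      · have h1 : ((k : Int) == (mask.length : Int) - 1) = false := by
          simp only [beq_eq_false_iff_ne, ne_eq]; omega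
        have hp : PySem.List.pyGetD mask ((k : Int) + 1) false = mask.getD (k + 1) false := by
          have hc : ((k : Int) + 1) = ((k + 1 : Nat) : Int) := by push_cast; ring
          rw [hc, PySem.List.pyGetD_natCast]
        rw [h1, hp]
        simp
    rw [hcond]
    have ihk := ih (k + 1) (by omega) (by omega)
    have hcast : ((k : Int) + 1) = ((k + 1 : Nat) : Int) := by push_cast; ring
    simp only [endsB2]
    rw [hcast, ihk]

-- ===== VERDICT (by name: the statement is the Claim_ definition above) =====
theorem mask_to_spans_spec : Claim_equal_mask_to_spans := by
  intro mask _
  unfold Spec_mask_to_spans mask_to_spans_alt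
  rw [mask_to_spans_eq_runsA, runsA_eq_zip]
  have hs := startsFilter mask 0 (by omega)
  have he := endsFilter mask 0 (by omega)
  simp only [Nat.cast_zero, List.drop_zero] at hs he
  rw [hs, he]
  simp [prevOf, endsB_eq_endsB2 mask false 0]
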